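-- pv_equiv track=rewrite | github.com/kalinote/cyberspacein | csi-back/app/service/html_analyze.py | _extract_srcset_urls
-- ===== SOURCE A (Python) =====
-- from typing import Set
--
-- def _filter_resource_url(url: str) -> str | None:
--     # 暂时不做过滤
--     return url
--
-- def _extract_srcset_urls(srcset: str) -> Set[str]:
--     urls: Set[str] = set()
--     if not srcset:
--         return urls
--     for item in srcset.split(','):
--         item = item.strip()
--         if not item:
--             continue
--         tokens = item.split()
--         if tokens:
--             u = _filter_resource_url(tokens[0])
--             if u:
--                 urls.add(u)
--     return urls
-- ===== SOURCE B (Python) =====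
-- def _extract_srcset_urls(srcset):
--     # single left-to-right character scan: no comma-split, no strip, no per-item split
--     urls = set()
--     tok = ""
--     have = None
--     for ch in srcset + ',':
--         if ch == ',':
--             if have is None and tok:
--                 have = tok
--             if have is not None:
--                 urls.add(have)
--             tok = ""
--             have = None
--         elif ch.isspace():
--             if have is None and tok:
--                 have = tok
--                 tok = ""
--         elif have is None:
--             tok += ch
--     return urls
-- ===== Notes on version B (the rewrite author's own statement) =====
-- stated objective: alternative
-- what changed: Replaces A's comma-split + per-item strip + per-item whitespace-split passes (each building intermediate lists) by a single left-to-right character scan that maintains the current token and the first finished token of the current entry.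
import Mathlib
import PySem

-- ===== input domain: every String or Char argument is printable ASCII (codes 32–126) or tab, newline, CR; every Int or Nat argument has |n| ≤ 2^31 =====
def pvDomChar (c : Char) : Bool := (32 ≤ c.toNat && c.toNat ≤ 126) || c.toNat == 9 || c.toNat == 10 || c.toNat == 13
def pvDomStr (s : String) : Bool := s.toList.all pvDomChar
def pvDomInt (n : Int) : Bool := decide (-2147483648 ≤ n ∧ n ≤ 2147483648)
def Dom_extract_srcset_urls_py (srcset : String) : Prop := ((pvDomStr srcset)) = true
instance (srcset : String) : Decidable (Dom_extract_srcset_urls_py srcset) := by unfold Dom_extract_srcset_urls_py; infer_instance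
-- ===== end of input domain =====

-- B replaces the comma-split + strip + whitespace-split passes by a single left-to-right
-- character scan (objective: alternative, one pass, no intermediate lists).


-- ===== PORT A =====
-- _filter_resource_url is the identity (the Python returns its argument unchanged)
def filter_resource_url_py (url : String) : Option String := some url

def extract_srcset_urls_py (srcset : String) : List String :=
  if srcset = "" then PySem.Set.empty
  else
    (PySem.Chars.splitOn srcset.toList [',']).foldl
      (fun urls item0 =>
        let item := PySem.Chars.strip item0
        if item = [] then urls
        else
          let tokens := PySem.Chars.split₀ item
          match tokens with
          | [] => urls
          | t :: _ =>
            match filter_resource_url_py (String.ofList t) with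
            | none => urls
            | some u => if u = "" then urls else PySem.Set.add urls u)
      PySem.Set.empty

-- ===== PORT B =====
-- the per-character state machine of Source B, one foldl over the chars of srcset + ',':
-- state = (tok = current token chars, hv = finished first token of the current entry, urls)
def scanStep (st : List Char × Option (List Char) × PySem.Set String) (c : Char) :
    List Char × Option (List Char) × PySem.Set String :=
  let tok := st.1
  let hv := st.2.1
  let urls := st.2.2
  if c = ',' then
      let hv2 : Option (List Char) := if hv = none ∧ tok ≠ [] then some tok else hv
      let urls2 := match hv2 with
        | some t => PySem.Set.add urls (String.ofList t)
        | none => urls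
      ([], none, urls2)
    else if PySem.Chars.isspace c then
      match hv, tok with
      | none, t :: ts => ([], some (t :: ts), urls)
      | _, _ => (tok, hv, urls)
    else
      match hv with
      | none => (tok ++ [c], none, urls)
      | some _ => (tok, hv, urls)

def extract_srcset_urls_py_alt (srcset : String) : List String :=
  ((srcset.toList ++ [',']).foldl scanStep ([], none, PySem.Set.empty)).2.2

-- ===== PRECONDITION & SPEC =====
def Spec_extract_srcset_urls_py (srcset : String) (out : List String) : Prop := out = extract_srcset_urls_py_alt srcset
instance (srcset : String) (out : List String) : Decidable (Spec_extract_srcset_urls_py srcset out) := by unfold Spec_extract_srcset_urls_py; infer_instance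

-- ===== CLAIM (what is proved, stated in full; the proofs are below) =====
def Claim_equal_extract_srcset_urls_py : Prop := ∀ (srcset : String), Dom_extract_srcset_urls_py srcset → Spec_extract_srcset_urls_py srcset (extract_srcset_urls_py srcset)

-- ===== LEMMAS AND PROOFS =====

-- proof-side helpers
def addOptTok (urls : PySem.Set String) : Option (List Char) → PySem.Set String
  | none => urls
  | some t => PySem.Set.add urls (String.ofList t)

def firstOf (hv : Option (List Char)) (tok seg : List Char) : Option (List Char) :=
  match hv with
  | some t => some t
  | none => (PySem.Chars.split₀ (tok ++ seg)).head?

def segStep (urls : PySem.Set String) (seg : List Char) : PySem.Set String :=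
  addOptTok urls (PySem.Chars.split₀ seg).head?

def segsFold (urls : PySem.Set String) (hv : Option (List Char)) (tok : List Char) :
    List (List Char) → PySem.Set String
  | [] => urls
  | seg :: rest => rest.foldl segStep (addOptTok urls (firstOf hv tok seg))

lemma segsFold_cons (urls : PySem.Set String) (hv : Option (List Char)) (tok seg : List Char)
    (rest : List (List Char)) :
    segsFold urls hv tok (seg :: rest) = rest.foldl segStep (addOptTok urls (firstOf hv tok seg)) := rfl

-- ==== split₀.go basics ====
lemma go0_nil' (cur : List Char) (acc : List (List Char)) :
    PySem.Chars.split₀.go [] cur acc =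
      if cur.isEmpty then acc.reverse else (cur.reverse :: acc).reverse := by
  simp [PySem.Chars.split₀.go]

lemma go0_space {c : Char} (h : PySem.Chars.isspace c = true) (s cur : List Char) (acc : List (List Char)) :
    PySem.Chars.split₀.go (c :: s) cur acc =
      if cur.isEmpty then PySem.Chars.split₀.go s [] acc
      else PySem.Chars.split₀.go s [] (cur.reverse :: acc) := by
  simp [PySem.Chars.split₀.go, h]

lemma go0_char {c : Char} (h : PySem.Chars.isspace c = false) (s cur : List Char) (acc : List (List Char)) :
    PySem.Chars.split₀.go (c :: s) cur acc = PySem.Chars.split₀.go s (c :: cur) acc := by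
  simp [PySem.Chars.split₀.go, h]

lemma go0_acc (s : List Char) : ∀ cur acc, PySem.Chars.split₀.go s cur acc =
    acc.reverse ++ PySem.Chars.split₀.go s cur [] := by
  induction s with
  | nil => intro cur acc; by_cases h : cur = [] <;> simp [go0_nil', h]
  | cons c s ih =>
    intro cur acc
    by_cases hs : PySem.Chars.isspace c = true
    · by_cases h : cur = []
      · subst h
        rw [go0_space hs, go0_space hs]
        simp only [List.isEmpty_nil, if_true]
        exact ih [] acc
      · have hne : cur.isEmpty = false := by simp [h]
        rw [go0_space hs, go0_space hs, hne]
        simp only [Bool.false_eq_true, if_false]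
        rw [ih [] (cur.reverse :: acc), ih [] [cur.reverse]]
        simp
    · rw [go0_char (by simpa using hs), go0_char (by simpa using hs), ih]

lemma split0_space {c : Char} (h : PySem.Chars.isspace c = true) (s : List Char) :
    PySem.Chars.split₀ (c :: s) = PySem.Chars.split₀ s := by
  unfold PySem.Chars.split₀
  rw [go0_space h]
  simp

-- scanning a whitespace-free prefix just accumulates it into cur
lemma go0_prefix (tok : List Char) : ∀ s cur acc, (∀ c ∈ tok, PySem.Chars.isspace c = false) →
    PySem.Chars.split₀.go (tok ++ s) cur acc = PySem.Chars.split₀.go s (tok.reverse ++ cur) acc := by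
  induction tok with
  | nil => intro s cur acc _; simp
  | cons c tok ih =>
    intro s cur acc h
    rw [List.cons_append, go0_char (h c (by simp)), ih s (c :: cur) acc (fun d hd => h d (by simp [hd]))]
    simp

lemma split0_tok (tok : List Char) (h : ∀ c ∈ tok, PySem.Chars.isspace c = false) :
    PySem.Chars.split₀ tok = if tok = [] then [] else [tok] := by
  unfold PySem.Chars.split₀
  have := go0_prefix tok [] [] [] h
  simp at this
  rw [this, go0_nil']
  by_cases ht : tok = [] <;> simp [ht]

lemma split0_tok_space {c : Char} (hc : PySem.Chars.isspace c = true)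
    (tok : List Char) (h : ∀ d ∈ tok, PySem.Chars.isspace d = false) (ht : tok ≠ []) (s : List Char) :
    PySem.Chars.split₀ (tok ++ c :: s) = tok :: PySem.Chars.split₀ s := by
  unfold PySem.Chars.split₀
  rw [go0_prefix tok (c :: s) [] [] h]
  rw [go0_space hc]
  simp [ht]
  rw [go0_acc]
  simp

-- a segment starting with a non-space char yields a nonempty first token
lemma go0_ne (s : List Char) : ∀ cur, cur ≠ [] →
    ∃ t rest, PySem.Chars.split₀.go s cur [] = t :: rest ∧ t ≠ [] := by
  induction s with
  | nil =>
    intro cur h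
    refine ⟨cur.reverse, [], ?_, by simpa using h⟩
    rw [go0_nil']
    simp [h]
  | cons c s ih =>
    intro cur h
    by_cases hs : PySem.Chars.isspace c = true
    · rw [go0_space hs]
      simp [h]
      rw [go0_acc]
      exact ⟨cur.reverse, ⟨PySem.Chars.split₀.go s [] [], by simp⟩, by simpa using h⟩
    · rw [go0_char (by simpa using hs)]
      exact ih (c :: cur) (by simp)

lemma split0_head_ne {c : Char} (hc : PySem.Chars.isspace c = false) (s : List Char) :
    ∃ t rest, PySem.Chars.split₀ (c :: s) = t :: rest ∧ t ≠ [] := by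
  unfold PySem.Chars.split₀
  rw [go0_char hc]
  exact go0_ne s [c] (by simp)

-- trailing whitespace is irrelevant
lemma go0_trail {c : Char} (hc : PySem.Chars.isspace c = true) (s : List Char) :
    ∀ cur acc, PySem.Chars.split₀.go (s ++ [c]) cur acc = PySem.Chars.split₀.go s cur acc := by
  induction s with
  | nil =>
    intro cur acc
    rw [List.nil_append, go0_space hc, go0_nil']
    by_cases h : cur = [] <;> simp [h, go0_nil']
  | cons d s ih =>
    intro cur acc
    by_cases hd : PySem.Chars.isspace d = true
    · rw [List.cons_append, go0_space hd, go0_space hd]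
      by_cases h : cur = [] <;> simp [h, ih]
    · rw [List.cons_append, go0_char (by simpa using hd), go0_char (by simpa using hd), ih]

lemma split0_lstrip (s : List Char) :
    PySem.Chars.split₀ (PySem.Chars.lstrip s) = PySem.Chars.split₀ s := by
  unfold PySem.Chars.lstrip
  induction s with
  | nil => simp
  | cons c s ih =>
    by_cases hc : PySem.Chars.isspace c = true
    · rw [List.dropWhile_cons_of_pos (by simp [hc]), ih, split0_space hc]
    · rw [List.dropWhile_cons_of_neg (by simp [hc])]

lemma split0_rev_drop (r : List Char) :
    PySem.Chars.split₀ (List.dropWhile PySem.Chars.isspace r).reverse = PySem.Chars.split₀ r.reverse := by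
  induction r with
  | nil => simp
  | cons c r ih =>
    by_cases hc : PySem.Chars.isspace c = true
    · rw [List.dropWhile_cons_of_pos (by simp [hc]), ih, List.reverse_cons]
      unfold PySem.Chars.split₀
      rw [go0_trail hc]
    · rw [List.dropWhile_cons_of_neg (by simp [hc])]

lemma split0_strip (s : List Char) :
    PySem.Chars.split₀ (PySem.Chars.strip s) = PySem.Chars.split₀ s := by
  unfold PySem.Chars.strip PySem.Chars.rstrip
  rw [split0_rev_drop, List.reverse_reverse, split0_lstrip]

-- ==== splitOn (sep = [',']) basics ====
lemma gos_zero (l cur : List Char) (acc : List (List Char)) :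
    PySem.Chars.splitOn.go [','] 0 l cur acc = ((cur.reverse ++ l) :: acc).reverse := by
  simp [PySem.Chars.splitOn.go]

lemma gos_nil (f : Nat) (cur : List Char) (acc : List (List Char)) :
    PySem.Chars.splitOn.go [','] (f + 1) [] cur acc = (cur.reverse :: acc).reverse := by
  simp [PySem.Chars.splitOn.go]

lemma gos_comma (f : Nat) (rest cur : List Char) (acc : List (List Char)) :
    PySem.Chars.splitOn.go [','] (f + 1) (',' :: rest) cur acc =
      PySem.Chars.splitOn.go [','] f rest [] (cur.reverse :: acc) := by
  simp [PySem.Chars.splitOn.go, List.isPrefixOf]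

lemma gos_char {c : Char} (h : c ≠ ',') (f : Nat) (rest cur : List Char) (acc : List (List Char)) :
    PySem.Chars.splitOn.go [','] (f + 1) (c :: rest) cur acc =
      PySem.Chars.splitOn.go [','] f rest (c :: cur) acc := by
  simp [PySem.Chars.splitOn.go, List.isPrefixOf, (by simpa using Ne.symm h : (',' == c) = false)]

lemma gos_acc (f : Nat) : ∀ (l cur : List Char) (acc : List (List Char)),
    PySem.Chars.splitOn.go [','] f l cur acc =
      acc.reverse ++ PySem.Chars.splitOn.go [','] f l cur [] := by
  induction f with
  | zero => intro l cur acc; simp [gos_zero]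
  | succ f ih =>
    intro l cur acc
    cases l with
    | nil => simp [gos_nil]
    | cons c rest =>
      by_cases hc : c = ','
      · subst hc
        rw [gos_comma, gos_comma, ih rest [] (cur.reverse :: acc), ih rest [] [cur.reverse]]
        simp
      · rw [gos_char hc, gos_char hc, ih]

lemma splitOn_nil : PySem.Chars.splitOn [] [','] = [[]] := by
  simp [PySem.Chars.splitOn, gos_nil]

lemma splitOn_comma (s : List Char) :
    PySem.Chars.splitOn (',' :: s) [','] = [] :: PySem.Chars.splitOn s [','] := by
  unfold PySem.Chars.splitOn
  rw [show (',' :: s).length + 1 = s.length + 1 + 1 by simp, gos_comma, gos_acc]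
  simp

lemma gos_spec : ∀ (s : List Char) (f : Nat) (cur : List Char), s.length ≤ f →
    PySem.Chars.splitOn.go [','] f s cur [] =
      List.modifyHead (cur.reverse ++ ·) (PySem.Chars.splitOn s [',']) := by
  intro s
  induction s with
  | nil =>
    intro f cur _
    cases f with
    | zero => simp [gos_zero, PySem.Chars.splitOn, gos_nil]
    | succ f => simp [gos_nil, PySem.Chars.splitOn]
  | cons c rest ih =>
    intro f cur hf
    cases f with
    | zero => simp at hf
    | succ f =>
      have hr : rest.length ≤ f := by simpa using hf
      by_cases hc : c = ','
      · subst hc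
        rw [gos_comma, gos_acc, ih f [] hr, splitOn_comma]
        simp
        cases PySem.Chars.splitOn rest [','] <;> simp
      · rw [gos_char hc, ih f (c :: cur) hr]
        have hstep : PySem.Chars.splitOn (c :: rest) [','] =
            List.modifyHead ([c] ++ ·) (PySem.Chars.splitOn rest [',']) := by
          unfold PySem.Chars.splitOn
          rw [show (c :: rest).length + 1 = rest.length + 1 + 1 by simp, gos_char hc,
            ih (rest.length + 1) [c] (by simp)]
          simp [PySem.Chars.splitOn]
        rw [hstep, List.modifyHead_modifyHead]
        congr 1
        funext x
        simp

lemma splitOn_char {c : Char} (h : c ≠ ',') (s : List Char) :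
    PySem.Chars.splitOn (c :: s) [','] =
      List.modifyHead (fun x => c :: x) (PySem.Chars.splitOn s [',']) := by
  unfold PySem.Chars.splitOn
  rw [show (c :: s).length + 1 = s.length + 1 + 1 by simp, gos_char h,
    gos_spec s (s.length + 1) [c] (by simp)]
  simp [PySem.Chars.splitOn]

lemma splitOn_ne_nil (s : List Char) : ∃ a t, PySem.Chars.splitOn s [','] = a :: t := by
  induction s with
  | nil => exact ⟨[], [], splitOn_nil⟩
  | cons c rest ih =>
    by_cases hc : c = ','
    · subst hc; exact ⟨[], PySem.Chars.splitOn rest [','], splitOn_comma rest⟩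
    · obtain ⟨a, t, h⟩ := ih
      exact ⟨c :: a, t, by rw [splitOn_char hc, h]; rfl⟩

-- ==== scanStep equations ====
lemma step_comma (tok : List Char) (hv : Option (List Char)) (urls : PySem.Set String) :
    scanStep (tok, hv, urls) ',' =
      ([], none, addOptTok urls (if hv = none ∧ tok ≠ [] then some tok else hv)) := by
  cases hv with
  | some t => rfl
  | none => cases tok with
    | nil => rfl
    | cons a ts => rfl

lemma step_space {c : Char} (h1 : ¬ c = ',') (h2 : PySem.Chars.isspace c = true)
    (tok : List Char) (hv : Option (List Char)) (urls : PySem.Set String) :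
    scanStep (tok, hv, urls) c =
      match hv, tok with
      | none, t :: ts => ([], some (t :: ts), urls)
      | _, _ => (tok, hv, urls) := by
  cases hv <;> cases tok <;> simp only [scanStep] <;> rw [if_neg h1, if_pos h2]

lemma step_char {c : Char} (h1 : ¬ c = ',') (h2 : PySem.Chars.isspace c = false)
    (tok : List Char) (hv : Option (List Char)) (urls : PySem.Set String) :
    scanStep (tok, hv, urls) c =
      match hv with
      | none => (tok ++ [c], none, urls)
      | some _ => (tok, hv, urls) := by
  cases hv <;> simp only [scanStep] <;> rw [if_neg h1, if_neg (by simp [h2])]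

lemma first_nil (hv : Option (List Char)) (tok : List Char)
    (h : ∀ c ∈ tok, PySem.Chars.isspace c = false) :
    firstOf hv tok [] = if hv = none ∧ tok ≠ [] then some tok else hv := by
  cases hv with
  | some t => simp [firstOf]
  | none =>
    cases tok with
    | nil => simp [firstOf, split0_tok [] (by simp)]
    | cons a ts =>
      simp only [firstOf, List.append_nil]
      rw [split0_tok (a :: ts) h]
      simp

-- ==== A's loop body computes the first whitespace token of the segment ====
lemma strip_head (s : List Char) (h : PySem.Chars.strip s ≠ []) :
    ∃ c t, PySem.Chars.strip s = c :: t ∧ PySem.Chars.isspace c = false := by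
  have hpre : PySem.Chars.strip s <+: PySem.Chars.lstrip s := by
    unfold PySem.Chars.strip PySem.Chars.rstrip
    have hsfx := List.dropWhile_suffix (l := (PySem.Chars.lstrip s).reverse) (p := PySem.Chars.isspace)
    obtain ⟨u, hu⟩ := hsfx
    exact ⟨u.reverse, by rw [← List.reverse_append, hu, List.reverse_reverse]⟩
  obtain ⟨c, t, hct⟩ : ∃ c t, PySem.Chars.strip s = c :: t := by
    cases hs : PySem.Chars.strip s with
    | nil => exact absurd hs h
    | cons c t => exact ⟨c, t, rfl⟩
  refine ⟨c, t, hct, ?_⟩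
  obtain ⟨u, hu⟩ := hpre
  rw [hct] at hu
  have hc : (PySem.Chars.lstrip s).head? = some c := by
    rw [← hu]; rfl
  unfold PySem.Chars.lstrip at hc
  cases hd : List.dropWhile PySem.Chars.isspace s with
  | nil => rw [hd] at hc; simp at hc
  | cons d ds =>
    have := List.head?_dropWhile_not PySem.Chars.isspace s
    rw [hd] at hc this
    simp at hc
    subst hc
    simpa using this

lemma Astep (urls : PySem.Set String) (item0 : List Char) :
    (let item := PySem.Chars.strip item0
     if item = [] then urls
     else
       let tokens := PySem.Chars.split₀ item
       match tokens with
       | [] => urls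
       | t :: _ =>
         match filter_resource_url_py (String.ofList t) with
         | none => urls
         | some u => if u = "" then urls else PySem.Set.add urls u) = segStep urls item0 := by
  by_cases h : PySem.Chars.strip item0 = []
  · have hsp : PySem.Chars.split₀ item0 = [] := by
      rw [← split0_strip, h]; rfl
    simp [h, segStep, addOptTok, hsp]
  · obtain ⟨c, t, hct, hcs⟩ := strip_head item0 h
    obtain ⟨tk, rest0, hsp, htk⟩ := by
      have := split0_head_ne hcs t
      rwa [← hct] at this
    have hseg : PySem.Chars.split₀ item0 = tk :: rest0 := by
      rw [← split0_strip, hsp]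
    have hne : String.ofList tk ≠ "" := by
      intro heq
      have := congrArg String.toList heq
      simp at this
      exact htk this
    simp [h, hsp, filter_resource_url_py, hne, segStep, hseg, addOptTok]

-- ==== the main invariant: the scan over cs + ',' folds segStep over the comma segments ====
lemma scan_spec : ∀ (cs tok : List Char) (hv : Option (List Char)) (urls : PySem.Set String),
    (∀ c ∈ tok, PySem.Chars.isspace c = false) →
    ((cs ++ [',']).foldl scanStep (tok, hv, urls)).2.2 =
      segsFold urls hv tok (PySem.Chars.splitOn cs [',']) := by
  intro cs
  induction cs with
  | nil =>
    intro tok hv urls hinv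
    rw [List.nil_append, List.foldl_cons, step_comma, List.foldl_nil, splitOn_nil,
      segsFold_cons, List.foldl_nil, first_nil hv tok hinv]
  | cons c cs ih =>
    intro tok hv urls hinv
    rw [List.cons_append, List.foldl_cons]
    obtain ⟨seg, rest, hsr⟩ := splitOn_ne_nil cs
    by_cases hc : c = ','
    · subst hc
      rw [step_comma, ih [] none _ (by simp), splitOn_comma, hsr,
        segsFold_cons, segsFold_cons, List.foldl_cons, first_nil hv tok hinv]
      rfl
    · by_cases hs : PySem.Chars.isspace c = true
      · rw [step_space hc hs, splitOn_char hc, hsr, List.modifyHead_cons]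
        cases hv with
        | some t =>
          rw [ih tok (some t) urls hinv, hsr, segsFold_cons, segsFold_cons]
          rfl
        | none =>
          cases tok with
          | nil =>
            rw [ih [] none urls (by simp), hsr, segsFold_cons, segsFold_cons]
            simp only [firstOf, List.nil_append]
            rw [split0_space hs]
          | cons a ts =>
            rw [ih [] (some (a :: ts)) urls (by simp), hsr, segsFold_cons, segsFold_cons]
            simp only [firstOf]
            rw [split0_tok_space hs (a :: ts) hinv (by simp) seg]
            rfl
      · rw [step_char hc (by simpa using hs), splitOn_char hc, hsr, List.modifyHead_cons]
        have hinv' : ∀ d ∈ tok ++ [c], PySem.Chars.isspace d = false := by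
          intro d hd
          rcases List.mem_append.mp hd with h1 | h1
          · exact hinv d h1
          · simp at h1; subst h1; simpa using hs
        cases hv with
        | some t =>
          rw [ih tok (some t) urls hinv, hsr, segsFold_cons, segsFold_cons]
          rfl
        | none =>
          rw [ih (tok ++ [c]) none urls hinv', hsr, segsFold_cons, segsFold_cons]
          simp only [firstOf]
          rw [List.append_assoc]
          rfl

-- ===== VERDICT (by name: the statement is the Claim_ definition above) =====
theorem extract_srcset_urls_py_spec : Claim_equal_extract_srcset_urls_py := by
  intro srcset _
  unfold Spec_extract_srcset_urls_py extract_srcset_urls_py extract_srcset_urls_py_alt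
  by_cases h : srcset = ""
  · subst h; rfl
  · rw [if_neg h]
    have hfun : (fun (urls : PySem.Set String) (item0 : List Char) =>
        let item := PySem.Chars.strip item0
        if item = [] then urls
        else
          let tokens := PySem.Chars.split₀ item
          match tokens with
          | [] => urls
          | t :: _ =>
            match filter_resource_url_py (String.ofList t) with
            | none => urls
            | some u => if u = "" then urls else PySem.Set.add urls u) = segStep :=
      funext fun u => funext fun s => Astep u s
    rw [hfun, scan_spec srcset.toList [] none PySem.Set.empty (by simp)]
    obtain ⟨seg, rest, hsr⟩ := splitOn_ne_nil srcset.toList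
    rw [hsr, segsFold_cons, List.foldl_cons]
    rfl
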